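-- pv_equiv track=rewrite | github.com/daniel-reich/ubiquitous-fiesta | baBNZFCozmjNhbp9Q_8.py | box_seq
-- ===== SOURCE A (Python) =====
-- def box_seq(step):
--   n = 0
--   for i in range(1,step + 1):
--     if i % 2 == 1:
--       n += 3
--     else:
--       n -= 1
--   return n
-- ===== SOURCE B (Python) =====
-- def box_seq(step):
--   # closed form: among 1..step there are ceil(step/2) odd indices (+3 each) and floor(step/2) even indices (-1 each)
--   n = max(step, 0)
--   return 3 * ((n + 1) // 2) - n // 2
-- ===== Notes on version B (the rewrite author's own statement) =====
-- stated objective: faster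
-- what changed: Replaced the O(step) accumulation loop by the closed-form 3*ceil(step/2) - floor(step/2) (with steps below 1 giving 0).
import Mathlib
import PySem

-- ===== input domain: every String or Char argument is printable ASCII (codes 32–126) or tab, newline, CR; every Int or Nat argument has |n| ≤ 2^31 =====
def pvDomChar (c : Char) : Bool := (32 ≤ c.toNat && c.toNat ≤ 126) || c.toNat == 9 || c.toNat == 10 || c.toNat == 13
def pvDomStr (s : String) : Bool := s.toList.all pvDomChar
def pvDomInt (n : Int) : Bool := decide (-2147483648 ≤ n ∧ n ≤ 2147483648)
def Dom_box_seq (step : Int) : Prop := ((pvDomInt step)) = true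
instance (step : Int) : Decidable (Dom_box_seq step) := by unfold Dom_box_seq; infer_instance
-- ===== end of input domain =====

-- B replaces A's O(step) loop by the O(1) closed form 3*ceil(step/2) - floor(step/2).

-- ===== PORT A =====
def box_seq (step : Int) : Int :=
  (PySem.List.pyRange 1 (step + 1) 1).foldl
    (fun n i => if PySem.Int.mod i 2 = 1 then n + 3 else n - 1) 0

-- ===== PORT B =====
def box_seq_alt (step : Int) : Int :=
  let n := max step 0
  3 * PySem.Int.floordiv (n + 1) 2 - PySem.Int.floordiv n 2

-- ===== PRECONDITION & SPEC =====
def Spec_box_seq (step : Int) (out : Int) : Prop := out = box_seq_alt step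
instance (step : Int) (out : Int) : Decidable (Spec_box_seq step out) := by unfold Spec_box_seq; infer_instance

-- ===== CLAIM (what is proved, stated in full; the proofs are below) =====
def Claim_equal_box_seq : Prop := ∀ (step : Int), Dom_box_seq step → Spec_box_seq step (box_seq step)

-- ===== LEMMAS AND PROOFS =====

-- A on a nonnegative argument: k plus 2 when k is odd
theorem box_seq_nat (k : Nat) :
    box_seq (k : Int) = if k % 2 = 0 then (k : Int) else (k : Int) + 2 := by
  induction k with
  | zero =>
      simp [box_seq, PySem.List.pyRange_one_eq_nil]
  | succ m ih =>
      have hsplit : PySem.List.pyRange 1 ((m : Int) + 1 + 1) 1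
          = PySem.List.pyRange 1 ((m : Int) + 1) 1 ++ [(m : Int) + 1] :=
        PySem.List.pyRange_one_succ_right (by omega)
      have hmod : PySem.Int.mod ((m : Int) + 1) 2 = ((m : Int) + 1) % 2 :=
        PySem.Int.mod_eq_emod_of_pos (by omega)
      unfold box_seq at ih ⊢
      push_cast
      rw [hsplit, List.foldl_append]
      simp only [List.foldl_cons, List.foldl_nil, hmod]
      rw [ih]
      rcases Nat.even_or_odd m with h | h
      · have h2 : m % 2 = 0 := Nat.even_iff.mp h
        have h3 : ((m : Int) + 1) % 2 = 1 := by omega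
        simp [h2, h3]; omega
      · have h2 : m % 2 = 1 := Nat.odd_iff.mp h
        have h3 : ((m : Int) + 1) % 2 = 0 := by omega
        simp [h2, h3]; omega

theorem box_seq_neg (step : Int) (h : step ≤ 0) : box_seq step = 0 := by
  unfold box_seq
  rw [PySem.List.pyRange_one_eq_nil (by omega)]
  rfl

theorem box_seq_alt_eval (step : Int) :
    box_seq_alt step = 3 * ((max step 0 + 1) / 2) - (max step 0) / 2 := by
  unfold box_seq_alt
  simp only []
  rw [PySem.Int.floordiv_eq_ediv_of_pos (show (0:Int) < 2 by omega),
      PySem.Int.floordiv_eq_ediv_of_pos (show (0:Int) < 2 by omega)]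

-- ===== VERDICT (by name: the statement is the Claim_ definition above) =====
theorem box_seq_spec : Claim_equal_box_seq := by
  intro step _
  unfold Spec_box_seq
  rw [box_seq_alt_eval]
  by_cases h : step ≤ 0
  · rw [box_seq_neg step h]
    have : max step 0 = 0 := by omega
    rw [this]; decide
  · rw [not_le] at h
    obtain ⟨k, rfl⟩ : ∃ k : Nat, step = (k : Int) :=
      ⟨step.toNat, by omega⟩
    rw [box_seq_nat k]
    have hmax : max (k : Int) 0 = (k : Int) := by omega
    rw [hmax]
    rcases Nat.even_or_odd k with he | he
    · have h2 : k % 2 = 0 := Nat.even_iff.mp he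
      have : (k : Int) % 2 = 0 := by omega
      simp [h2]; omega
    · have h2 : k % 2 = 1 := Nat.odd_iff.mp he
      have : (k : Int) % 2 = 1 := by omega
      simp [h2]; omega
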